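-- pv_equiv track=rewrite | github.com/lnls-ids/XBPM-bumps | xbpm_bumps/ui/main_window.py | _format_sections_output
-- ===== SOURCE A (Python) =====
-- def _format_sections_output(sections: dict[str, list[str]],
--                             active_section: str) -> str:
--     """Format all sections into final output string."""
--     ordered_sections = (
--         [active_section] if active_section else list(sections.keys())
--     )
--
--     lines: list[str] = []
--     for name in ordered_sections:
--         content = sections.get(name)
--         if not content:
--             continue
--         prefix = "** " if name == active_section else ""
--         lines.append(f"{prefix}{name.capitalize()}:")
--         lines.extend(content)
--         lines.append("")
--
--     if lines and lines[-1] == "":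
--         lines.pop()
--
--     if lines:
--         return "\n".join(lines)
--
--     if active_section:
--         return "No metadata for this tab."
--     return "No analysis metadata available yet."
-- ===== SOURCE B (Python) =====
-- def _format_sections_output(sections: dict[str, list[str]],
--                             active_section: str) -> str:
--     """Format all sections into final output string."""
--     if active_section:
--         content = sections.get(active_section)
--         if content:
--             return "\n".join([f"** {active_section.capitalize()}:", *content])
--         return "No metadata for this tab."
--     blocks = ["\n".join([f"{name.capitalize()}:", *content])
--               for name, content in sections.items() if content]
--     if blocks:
--         return "\n\n".join(blocks)
--     return "No analysis metadata available yet."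
-- ===== Notes on version B (the rewrite author's own statement) =====
-- stated objective: simpler
-- what changed: B splits the function into two loop-free/staged cases: the active-section case is a single dict lookup with no loop at all, and the general case is a filter+map comprehension over sections.items() (no per-name .get lookup, no flat line list, no blank-line sentinels, no trailing pop).
-- intended difference: When active_section is the empty string and the dict stores a non-empty section under the empty key, A prefixes that section's header with '** ' (the active-section marker, though no section is active) returning e.g. '** :\nx', while B returns ':\nx'; B is intended since '** ' is meant to mark the active section only. — e.g. on _format_sections_output([("", ["x"])], ""): A returns "** :\nx", B returns ":\nx"
import Mathlib
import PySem

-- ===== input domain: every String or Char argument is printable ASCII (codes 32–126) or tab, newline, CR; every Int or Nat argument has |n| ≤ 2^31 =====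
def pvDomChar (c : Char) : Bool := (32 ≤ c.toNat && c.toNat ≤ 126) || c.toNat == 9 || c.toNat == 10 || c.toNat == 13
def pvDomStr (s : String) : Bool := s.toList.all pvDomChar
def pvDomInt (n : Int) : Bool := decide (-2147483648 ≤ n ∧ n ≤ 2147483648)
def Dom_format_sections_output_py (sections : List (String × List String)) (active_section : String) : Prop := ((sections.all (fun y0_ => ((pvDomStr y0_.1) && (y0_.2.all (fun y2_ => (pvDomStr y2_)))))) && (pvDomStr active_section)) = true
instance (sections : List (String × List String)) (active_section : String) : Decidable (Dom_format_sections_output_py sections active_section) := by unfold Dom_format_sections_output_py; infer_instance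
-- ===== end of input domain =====

-- B replaces A's single loop over a flat line list (blank-line sentinels + trailing pop) by two
-- loop-free/staged cases: one dict lookup when a section is active, else a filter+map over the
-- dict's items (objective: simpler).

-- shared primitive: Python's str.capitalize(), exact on the ASCII domain
def pyCapitalize (s : String) : String :=
  match s.toList with
  | [] => s
  | c :: rest => String.ofList (PySem.Chars.upperChar c :: PySem.Chars.lower rest)

-- ===== PORT A =====
def format_sections_output_py (sections : List (String × List String)) (active_section : String) : String :=
  let d := PySem.Dict.ofList sections
  let ordered := if active_section ≠ "" then [active_section] else d.keys
  let lines : List String := ordered.foldl (fun lines name =>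
    match d.get? name with
    | none => lines
    | some content =>
      if content = [] then lines
      else (lines ++ [(if name == active_section then "** " else "") ++ pyCapitalize name ++ ":"])
             ++ content ++ [""]) []
  let lines := if lines ≠ [] ∧ lines.getLast? = some "" then lines.dropLast else lines
  if lines ≠ [] then PySem.Str.join "\n" lines
  else if active_section ≠ "" then "No metadata for this tab."
  else "No analysis metadata available yet."

-- ===== PORT B =====
def format_sections_output_py_alt (sections : List (String × List String)) (active_section : String) : String :=
  if active_section ≠ "" then
    match (PySem.Dict.ofList sections).get? active_section with
    | some content =>
      if content ≠ [] then
        PySem.Str.join "\n" (("** " ++ pyCapitalize active_section ++ ":") :: content)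
      else "No metadata for this tab."
    | none => "No metadata for this tab."
  else
    let blocks := ((PySem.Dict.ofList sections).items.filter (fun p => p.2 ≠ [])).map
      (fun p => PySem.Str.join "\n" ((pyCapitalize p.1 ++ ":") :: p.2))
    if blocks ≠ [] then PySem.Str.join "\n\n" blocks
    else "No analysis metadata available yet."

-- ===== PRECONDITION & SPEC =====
-- When active_section is "" and the dict stores a non-empty section under the empty key, A marks
-- that section's header with "** " (the active-section marker although no section is active),
-- e.g. "** :\nx"; B returns ":\nx", the intended value since "** " marks the active section only.
def D_format_sections_output_py (sections : List (String × List String)) (active_section : String) : Prop :=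
  active_section = "" ∧ (PySem.Dict.ofList sections).getD "" [] ≠ []
instance (sections : List (String × List String)) (active_section : String) : Decidable (D_format_sections_output_py sections active_section) := by unfold D_format_sections_output_py; infer_instance

def Spec_format_sections_output_py (sections : List (String × List String)) (active_section : String) (out : String) : Prop := ¬ D_format_sections_output_py sections active_section → out = format_sections_output_py_alt sections active_section
instance (sections : List (String × List String)) (active_section : String) (out : String) : Decidable (Spec_format_sections_output_py sections active_section out) := by unfold Spec_format_sections_output_py; infer_instance

def pvDiffWitness_format_sections_output_py : (List (String × List String)) × String := ([("", ["x"])], "")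
def pvDiffWitnessOut_format_sections_output_py : String × String := ("** :\nx", ":\nx")

-- ===== CLAIM (what is proved, stated in full; the proofs are below) =====
def Claim_unchanged_format_sections_output_py : Prop := ∀ (sections : List (String × List String)) (active_section : String), Dom_format_sections_output_py sections active_section → Spec_format_sections_output_py sections active_section (format_sections_output_py sections active_section)
def Claim_changed_format_sections_output_py : Prop := Dom_format_sections_output_py (pvDiffWitness_format_sections_output_py.1) (pvDiffWitness_format_sections_output_py.2) ∧ D_format_sections_output_py (pvDiffWitness_format_sections_output_py.1) (pvDiffWitness_format_sections_output_py.2) ∧ format_sections_output_py (pvDiffWitness_format_sections_output_py.1) (pvDiffWitness_format_sections_output_py.2) = pvDiffWitnessOut_format_sections_output_py.1 ∧ format_sections_output_py_alt (pvDiffWitness_format_sections_output_py.1) (pvDiffWitness_format_sections_output_py.2) = pvDiffWitnessOut_format_sections_output_py.2 ∧ pvDiffWitnessOut_format_sections_output_py.1 ≠ pvDiffWitnessOut_format_sections_output_py.2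

-- ===== LEMMAS AND PROOFS =====

-- the per-section block (header line :: content), none when the section is skipped
def blkOf (d : PySem.Dict String (List String)) (a : String) (name : String) : Option (List String) :=
  match d.get? name with
  | none => none
  | some content =>
    if content = [] then none
    else some (((if name == a then "** " else "") ++ pyCapitalize name ++ ":") :: content)

lemma foldA (d : PySem.Dict String (List String)) (a : String) :
    ∀ (l : List String) (acc : List String),
    l.foldl (fun lines name =>
      match d.get? name with
      | none => lines
      | some content =>
        if content = [] then lines
        else (lines ++ [(if name == a then "** " else "") ++ pyCapitalize name ++ ":"])
               ++ content ++ [""]) acc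
    = acc ++ (l.filterMap (blkOf d a)).flatMap (· ++ [""]) := by
  intro l
  induction l with
  | nil => intro acc; simp
  | cons n t ih =>
    intro acc
    rw [List.foldl_cons, ih]
    simp only [List.filterMap_cons, blkOf]
    cases h : d.get? n with
    | none => simp
    | some content =>
      by_cases hc : content = [] <;> simp [hc]

-- glue e [b1, …, bk] = b1 ++ e :: b2 ++ e :: … ++ bk  (the flat line list without the trailing sentinel)
def glue {α : Type} (e : α) : List (List α) → List α
  | [] => []
  | [b] => b
  | b :: r :: t => b ++ e :: glue e (r :: t)

lemma glue_ne_nil {α : Type} (e : α) (b : List α) (rest : List (List α)) (hb : b ≠ []) :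
    glue e (b :: rest) ≠ [] := by
  cases rest with
  | nil => simpa [glue] using hb
  | cons r t => simp [glue]

lemma flatMap_concat_ne_nil {α : Type} (e : α) (b : List α) (rest : List (List α)) :
    (b :: rest).flatMap (· ++ [e]) ≠ [] := by
  simp

lemma getLast?_flatMap_concat {α : Type} (e : α) :
    ∀ (bs : List (List α)), bs ≠ [] → (bs.flatMap (· ++ [e])).getLast? = some e := by
  intro bs
  induction bs with
  | nil => simp
  | cons b t ih =>
    intro _
    cases t with
    | nil => simp
    | cons r s =>
      rw [List.flatMap_cons, List.getLast?_append_of_ne_nil _ (flatMap_concat_ne_nil e r s)]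
      exact ih (by simp)

lemma dropLast_flatMap_concat {α : Type} (e : α) :
    ∀ (bs : List (List α)), bs ≠ [] → (bs.flatMap (· ++ [e])).dropLast = glue e bs := by
  intro bs
  induction bs with
  | nil => simp
  | cons b t ih =>
    intro _
    cases t with
    | nil => simp [glue]
    | cons r s =>
      rw [List.flatMap_cons, List.dropLast_append_of_ne_nil (flatMap_concat_ne_nil e r s),
          ih (by simp), glue]
      simp

lemma glue_map {α β : Type} (f : α → β) (e : α) :
    ∀ (bs : List (List α)), (glue e bs).map f = glue (f e) (bs.map (List.map f)) := by
  intro bs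
  induction bs with
  | nil => simp [glue]
  | cons b t ih =>
    cases t with
    | nil => simp [glue]
    | cons r s => simp [glue, ih]

lemma chars_join_append (sep : List Char) :
    ∀ (l1 l2 : List (List Char)), l1 ≠ [] → l2 ≠ [] →
    PySem.Chars.join sep (l1 ++ l2)
      = PySem.Chars.join sep l1 ++ sep ++ PySem.Chars.join sep l2 := by
  intro l1
  induction l1 with
  | nil => simp
  | cons a t ih =>
    intro l2 _ h2
    cases t with
    | nil =>
      cases l2 with
      | nil => exact absurd rfl h2
      | cons c t2 =>
        rw [List.singleton_append, PySem.Chars.join_cons_cons, PySem.Chars.join_singleton]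
    | cons a2 t1 =>
      have : ((a2 :: t1) ++ l2) = a2 :: (t1 ++ l2) := by simp
      rw [List.cons_append, this, PySem.Chars.join_cons_cons, ← this,
          ih l2 (by simp) h2, PySem.Chars.join_cons_cons]
      simp [List.append_assoc]

lemma chars_glue_join (sep : List Char) :
    ∀ (bs : List (List (List Char))), (∀ b ∈ bs, b ≠ []) → bs ≠ [] →
    PySem.Chars.join sep (glue [] bs)
      = PySem.Chars.join (sep ++ sep) (bs.map (PySem.Chars.join sep)) := by
  intro bs
  induction bs with
  | nil => simp
  | cons b t ih =>
    intro hne _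
    have hb : b ≠ [] := hne b (by simp)
    cases t with
    | nil => simp [glue, PySem.Chars.join_singleton]
    | cons r s =>
      have hr : r ≠ [] := hne r (by simp)
      have hG : glue ([] : List Char) (r :: s) ≠ [] := glue_ne_nil _ r s hr
      obtain ⟨g, gs, hGe⟩ := List.exists_cons_of_ne_nil hG
      simp only [List.map_cons]
      rw [glue, chars_join_append sep b ([] :: glue [] (r :: s)) hb (by simp), hGe,
          PySem.Chars.join_cons_cons, ← hGe,
          ih (fun x hx => hne x (by simp [hx])) (by simp),
          PySem.Chars.join_cons_cons]
      simp [List.append_assoc]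

lemma str_glue_join (bs : List (List String)) (hne : ∀ b ∈ bs, b ≠ []) (h : bs ≠ []) :
    PySem.Str.join "\n" (glue "" bs)
      = PySem.Str.join "\n\n" (bs.map (fun b => PySem.Str.join "\n" b)) := by
  apply String.toList_inj.mp
  rw [PySem.Str.toList_join, PySem.Str.toList_join, glue_map String.toList ""]
  have h1 : ("" : String).toList = ([] : List Char) := rfl
  have h2 : ("\n\n" : String).toList = ("\n" : String).toList ++ ("\n" : String).toList := rfl
  rw [h1, h2]
  have h3 : (bs.map (fun b => PySem.Str.join "\n" b)).map String.toList
      = (bs.map (List.map String.toList)).map (PySem.Chars.join ("\n" : String).toList) := by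
    simp [List.map_map, Function.comp, PySem.Str.toList_join]
  rw [h3]
  apply chars_glue_join
  · intro b hb
    obtain ⟨x, hx, hxe⟩ := List.mem_map.mp hb
    subst hxe
    simpa using hne x hx
  · simpa using h

-- A's flat-line expression (blank sentinels + conditional pop + "\n"-join) equals the
-- "\n\n"-join of the per-block "\n"-joins, for any list of non-empty blocks
lemma join_blocks (bs : List (List String)) (hne : ∀ b ∈ bs, b ≠ []) (noStr : String) :
    (let L := bs.flatMap (· ++ [""])
     let L' := if L ≠ [] ∧ L.getLast? = some "" then L.dropLast else L
     if L' ≠ [] then PySem.Str.join "\n" L' else noStr)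
    = (if bs.map (fun b => PySem.Str.join "\n" b) ≠ [] then
        PySem.Str.join "\n\n" (bs.map (fun b => PySem.Str.join "\n" b)) else noStr) := by
  cases bs with
  | nil => simp
  | cons b rest =>
    have hb : b ≠ [] := hne b (by simp)
    have hcond : (b :: rest).flatMap (· ++ [""]) ≠ [] ∧
        ((b :: rest).flatMap (· ++ [""])).getLast? = some "" :=
      ⟨flatMap_concat_ne_nil "" b rest, getLast?_flatMap_concat "" (b :: rest) (by simp)⟩
    show (if (if _ ∧ _ then _ else _) ≠ [] then _ else _) = _
    rw [if_pos hcond, dropLast_flatMap_concat "" (b :: rest) (by simp),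
        if_pos (glue_ne_nil "" b rest hb),
        if_pos (by simp : (b :: rest).map (fun b => PySem.Str.join "\n" b) ≠ [])]
    exact str_glue_join (b :: rest) hne (by simp)

-- in B's comprehension shape: filterMap of an "if-none" function is filter-then-map
lemma filterMap_if {α β : Type} (f : α → β) (p : α → Prop) [DecidablePred p] (l : List α) :
    l.filterMap (fun x => if p x then some (f x) else none)
      = (l.filter (fun x => decide (p x))).map f := by
  induction l with
  | nil => simp
  | cons x t ih => by_cases h : p x <;> simp [h, ih]

-- outside D_, A's kept blocks over d.keys are exactly B's comprehension blocks
lemma bs_eq (d : PySem.Dict String (List String)) (hnd : d.keys.Nodup)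
    (h0 : d.getD "" [] = []) :
    d.keys.filterMap (blkOf d "")
      = (d.items.filter (fun p => p.2 ≠ [])).map (fun p => (pyCapitalize p.1 ++ ":") :: p.2) := by
  have hk : d.keys = d.items.map (·.1) := by simp only [PySem.Dict.keys]
  rw [hk, List.filterMap_map]
  rw [List.filterMap_congr (g := fun p => if p.2 ≠ [] then
        some ((pyCapitalize p.1 ++ ":") :: p.2) else none) ?_]
  · exact filterMap_if _ _ _
  · rintro ⟨k, v⟩ hp
    have hg : d.get? k = some v := PySem.Dict.get?_of_mem_items d hp hnd
    simp only [Function.comp, blkOf, hg]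
    by_cases hc : v = []
    · simp [hc]
    · have hne : k ≠ "" := by
        intro h
        have : d.getD k [] = v := PySem.Dict.getD_of_mem_items d hp hnd []
        rw [h, h0] at this
        exact hc this.symm
      simp [hc, hne]

-- ===== VERDICT (by name: the statement is the Claim_ definition above) =====
theorem format_sections_output_py_spec : Claim_unchanged_format_sections_output_py := by
  intro sections active_section _ hnd
  unfold D_format_sections_output_py at hnd
  by_cases ha : active_section = ""
  · -- general case: A's loop over d.keys vs B's comprehension over d.items
    subst ha
    have h0 : (PySem.Dict.ofList sections).getD "" [] = [] := by
      by_contra h; exact hnd ⟨rfl, h⟩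
    have eA : format_sections_output_py sections "" =
        (let L := ((PySem.Dict.ofList sections).keys).foldl (fun lines name =>
            match (PySem.Dict.ofList sections).get? name with
            | none => lines
            | some content =>
              if content = [] then lines
              else (lines ++ [(if name == "" then "** " else "") ++ pyCapitalize name ++ ":"])
                     ++ content ++ [""]) []
         let L' := if L ≠ [] ∧ L.getLast? = some "" then L.dropLast else L
         if L' ≠ [] then PySem.Str.join "\n" L' else "No analysis metadata available yet.") := rfl
    have eB : format_sections_output_py_alt sections "" =
        (if (((PySem.Dict.ofList sections).items.filter (fun p => p.2 ≠ [])).map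
            (fun p => PySem.Str.join "\n" ((pyCapitalize p.1 ++ ":") :: p.2))) ≠ [] then
          PySem.Str.join "\n\n" (((PySem.Dict.ofList sections).items.filter (fun p => p.2 ≠ [])).map
            (fun p => PySem.Str.join "\n" ((pyCapitalize p.1 ++ ":") :: p.2)))
         else "No analysis metadata available yet.") := rfl
    rw [eA, eB, foldA (PySem.Dict.ofList sections) "" ((PySem.Dict.ofList sections).keys) [],
        List.nil_append,
        bs_eq (PySem.Dict.ofList sections) (PySem.Dict.nodup_keys_ofList sections) h0,
        join_blocks _ (fun b hb => by
          obtain ⟨p, _, hpe⟩ := List.mem_map.mp hb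
          exact hpe ▸ (by simp)) "No analysis metadata available yet."]
    rw [List.map_map]
    simp only [Function.comp_def]
  · -- active case: a single lookup
    have eA : format_sections_output_py sections active_section =
        (let L := (if active_section ≠ "" then [active_section]
                   else (PySem.Dict.ofList sections).keys).foldl (fun lines name =>
            match (PySem.Dict.ofList sections).get? name with
            | none => lines
            | some content =>
              if content = [] then lines
              else (lines ++ [(if name == active_section then "** " else "")
                      ++ pyCapitalize name ++ ":"]) ++ content ++ [""]) []
         let L' := if L ≠ [] ∧ L.getLast? = some "" then L.dropLast else L
         if L' ≠ [] then PySem.Str.join "\n" L'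
         else if active_section ≠ "" then "No metadata for this tab."
         else "No analysis metadata available yet.") := rfl
    rw [eA]
    unfold format_sections_output_py_alt
    repeat rw [if_pos ha]
    simp only [List.foldl_cons, List.foldl_nil]
    cases hg : (PySem.Dict.ofList sections).get? active_section with
    | none => simp
    | some content =>
      by_cases hc : content = []
      · simp [hc]
      · simp only [hc, if_false, List.nil_append, beq_self_eq_true, if_true]
        simp only [List.singleton_append]
        have hcond : ((("** " ++ pyCapitalize active_section ++ ":") :: content) ++ [""]) ≠ [] ∧
            (((("** " ++ pyCapitalize active_section ++ ":") :: content) ++ [""]).getLast?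
              = some "") := ⟨by simp, List.getLast?_concat⟩
        rw [if_pos hcond, List.dropLast_concat]
        simp [hc]

theorem format_sections_output_py_changed : Claim_changed_format_sections_output_py := by
  unfold Claim_changed_format_sections_output_py; decide
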